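-- pv_equiv track=rewrite | github.com/jmill0823/code | w.py | my_bow_vectorizer
-- ===== SOURCE A (Python) =====
-- from collections import Counter
--
-- def my_bow_vectorizer(texts):
--     vocab = Counter()
--     for text in texts:
--         vocab.update(text.split())
--
--     vectors = []
--     for text in texts:
--         vector = [0] * len(vocab)
--         for i, word in enumerate(vocab.keys()):
--             vector[i] = text.split().count(word)
--         vectors.append(vector)
--
--     return vectors
-- ===== SOURCE B (Python) =====
-- def my_bow_vectorizer(texts):
--     # Build a word -> column index table in first-seen order (Counter's key order),
--     # then one forward pass per text instead of a vocab-sized scan of the tokens.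
--     index = {}
--     for text in texts:
--         for word in text.split():
--             if word not in index:
--                 index[word] = len(index)
--     vectors = []
--     for text in texts:
--         vector = [0] * len(index)
--         for word in text.split():
--             vector[index[word]] += 1
--         vectors.append(vector)
--     return vectors
-- ===== Notes on version B (the rewrite author's own statement) =====
-- stated objective: faster
-- what changed: Replaces A's per-vocabulary-word rescans (text.split().count(word) for every vocab word, re-splitting the text each time) with a word-to-column index dict built once in first-seen order and a single accumulating pass over each text's tokens.
import Mathlib
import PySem

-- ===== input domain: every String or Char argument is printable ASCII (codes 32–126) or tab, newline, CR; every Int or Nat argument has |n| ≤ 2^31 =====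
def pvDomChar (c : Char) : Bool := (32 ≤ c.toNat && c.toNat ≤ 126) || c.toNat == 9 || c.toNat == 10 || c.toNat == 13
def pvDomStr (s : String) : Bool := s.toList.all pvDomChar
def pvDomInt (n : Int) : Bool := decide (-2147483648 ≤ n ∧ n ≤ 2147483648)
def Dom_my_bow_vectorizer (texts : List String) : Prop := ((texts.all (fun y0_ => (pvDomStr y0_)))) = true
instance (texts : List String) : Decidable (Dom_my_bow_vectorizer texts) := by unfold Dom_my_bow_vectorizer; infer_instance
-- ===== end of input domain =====

-- B replaces A's per-vocabulary-word rescans of each text with a word→column index dict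
-- built once in first-seen order plus a single accumulating pass over each text's tokens.

-- ===== PORT A =====
def my_bow_vectorizer (texts : List String) : List (List Int) :=
  -- vocab = Counter(); for text in texts: vocab.update(text.split())
  let vocab : PySem.Dict String Int :=
    texts.foldl (fun d t => (PySem.Str.split₀ t).foldl (fun d w => d.modify w 0 (· + 1)) d)
      PySem.Dict.empty
  -- for text in texts: vector = [0]*len(vocab); for i, word in enumerate(vocab.keys()): vector[i] = text.split().count(word)
  -- (the index i produced by enumerate is always in range of vector, so the total pySetD is exact here)
  texts.foldl
    (fun vectors t =>
      let vector : List Int :=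
        (PySem.List.enumerate vocab.keys).foldl
          (fun v p => PySem.List.pySetD v p.1 ((PySem.List.count (PySem.Str.split₀ t) p.2 : Int)))
          (List.replicate vocab.size 0)
      vectors ++ [vector])
    []

-- ===== PORT B =====
def my_bow_vectorizer_alt (texts : List String) : List (List Int) :=
  -- index = {}; for text in texts: for word in text.split(): if word not in index: index[word] = len(index)
  let index : PySem.Dict String Int :=
    texts.foldl (fun d t => (PySem.Str.split₀ t).foldl
        (fun d w => if d.contains w then d else d.insert w (d.size : Int)) d)
      PySem.Dict.empty
  -- vector = [0]*len(index); for word in text.split(): vector[index[word]] += 1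
  -- (index[word] never raises: every token was inserted by the first pass, and its value is a
  -- nonnegative in-range position, so getD/pyGetD/pySetD are exact here)
  texts.map (fun t =>
    (PySem.Str.split₀ t).foldl
      (fun v w =>
        let i := index.getD w 0
        PySem.List.pySetD v i (PySem.List.pyGetD v i 0 + 1))
      (List.replicate index.size 0))

-- ===== PRECONDITION & SPEC =====
def Spec_my_bow_vectorizer (texts : List String) (out : List (List Int)) : Prop := out = my_bow_vectorizer_alt texts
instance (texts : List String) (out : List (List Int)) : Decidable (Spec_my_bow_vectorizer texts out) := by unfold Spec_my_bow_vectorizer; infer_instance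

-- ===== CLAIM (what is proved, stated in full; the proofs are below) =====
def Claim_equal_my_bow_vectorizer : Prop := ∀ (texts : List String), Dom_my_bow_vectorizer texts → Spec_my_bow_vectorizer texts (my_bow_vectorizer texts)

-- ===== LEMMAS AND PROOFS =====

-- flatten a foldl over texts of foldls over their token lists into one foldl over all tokens
theorem pv_foldl_flat {σ : Type} (g : σ → String → σ) (texts : List String) (d : σ) :
    texts.foldl (fun d t => (PySem.Str.split₀ t).foldl g d) d
      = (texts.flatMap PySem.Str.split₀).foldl g d := by
  induction texts generalizing d with
  | nil => rfl
  | cons t ts ih => simp [List.foldl_append, ih]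

-- A's enumerate loop writes f(keys[i]) into slot i of the vector: it is keys.map f
theorem pv_enum_fill (f : String → Int) (keys : List String) :
    ∀ (s : Nat) (v : List Int), v.length = s + keys.length →
    (PySem.List.enumerate keys (s : Int)).foldl (fun v p => PySem.List.pySetD v p.1 (f p.2)) v
      = v.take s ++ keys.map f := by
  induction keys with
  | nil =>
      intro s v hv
      simp only [List.length_nil, Nat.add_zero] at hv
      simp [PySem.List.enumerate, List.take_of_length_le hv.le]
  | cons k ks ih =>
      intro s v hv
      simp only [List.length_cons] at hv
      rw [PySem.List.enumerate_cons]
      have hs : s < v.length := by omega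
      have h1 : ((s : Int) + 1) = ((s + 1 : Nat) : Int) := by push_cast; ring
      simp only [List.foldl_cons, PySem.List.pySetD_natCast, h1]
      rw [ih (s + 1) (v.set s (f k)) (by simp; omega)]
      rw [List.set_eq_take_append_cons_drop]
      simp only [hs, if_true]
      rw [List.take_append]
      simp [List.take_take, List.length_take, Nat.min_eq_left hs.le]

-- the index dict's contains tests membership in its key list
theorem pv_dict_contains (K : List String) (w : String) :
    (PySem.Dict.mk (K.zipIdx.map (fun p => (p.1, (p.2 : Int))))).contains w
      = decide (w ∈ K) := by
  show (K.zipIdx.map (fun p => (p.1, (p.2 : Int)))).any (fun p => p.1 == w) = decide (w ∈ K)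
  rw [List.any_map, show ((fun p : String × Int => p.1 == w) ∘ fun p : String × Nat => (p.1, (p.2 : Int))) = ((· == w) ∘ Prod.fst) from rfl,
    ← List.any_map, List.zipIdx_map_fst]
  rw [Bool.eq_iff_iff]; simp only [List.any_eq_true, beq_iff_eq, decide_eq_true_iff]
  exact ⟨fun ⟨x, hx, he⟩ => he ▸ hx, fun h => ⟨w, h, rfl⟩⟩

theorem pv_bdict (ws : List String) :
    ∀ (K : List String),
    ws.foldl (fun d w => if d.contains w then d else d.insert w (d.size : Int))
        (PySem.Dict.mk (K.zipIdx.map (fun p => (p.1, (p.2 : Int)))))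
      = PySem.Dict.mk ((PySem.Set.update K ws).zipIdx.map (fun p => (p.1, (p.2 : Int)))) := by
  induction ws with
  | nil => intro K; simp [PySem.Set.update]
  | cons w ws ih =>
      intro K
      rw [List.foldl_cons, PySem.Set.update_cons, PySem.Set.add_eq_ite, pv_dict_contains]
      by_cases h : w ∈ K
      · simp only [h, decide_true, if_true, ← ih]
      · simp only [h, decide_false, Bool.false_eq_true, if_false, ← ih]
        congr 1
        rw [PySem.Dict.insert]
        simp only [pv_dict_contains, h, decide_false, Bool.false_eq_true, if_false]
        congr 1
        simp [PySem.Dict.size, List.zipIdx_append]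

-- looking up a key in the index dict yields its position
theorem pv_idx_get (w : String) :
    ∀ (K : List String), w ∈ K → ∀ (n : Nat),
    (PySem.Dict.mk ((K.zipIdx n).map (fun p => (p.1, (p.2 : Int))))).get? w
      = some ((n + List.idxOf w K : Nat) : Int) := by
  intro K
  induction K with
  | nil => intro hw; cases hw
  | cons k ks ih =>
      intro hw n
      by_cases hk : k = w
      · subst hk
        simp [PySem.Dict.get?, List.zipIdx_cons]
      · have hw' : w ∈ ks := by cases hw with | head => exact absurd rfl hk | tail _ h => exact h
        have hrec := ih hw' (n + 1)
        simp only [PySem.Dict.get?] at hrec ⊢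
        rw [List.zipIdx_cons]
        simp only [List.map_cons, List.find?_cons]
        have hb : (k == w) = false := beq_eq_false_iff_ne.mpr hk
        simp only [hb, hrec, List.idxOf_cons_ne _ hk]
        congr 1
        push_cast
        ring

-- writing x at idxOf w into a vector that is K.map c
theorem pv_set_map (K : List String) (hK : K.Nodup) (c : String → Int) (w : String) (hw : w ∈ K) (x : Int) :
    (K.map c).set (List.idxOf w K) x = K.map (fun k => if k = w then x else c k) := by
  have hi : List.idxOf w K < K.length := List.idxOf_lt_length_of_mem hw
  apply List.ext_getElem (by simp)
  intro j h1 h2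
  simp only [List.getElem_set, List.getElem_map]
  by_cases hj : j = List.idxOf w K
  · subst hj; simp [List.getElem_idxOf]
  · rw [if_neg (fun he => hj he.symm), if_neg]
    intro he
    apply hj
    exact (List.Nodup.getElem_inj_iff hK).mp (by rw [List.getElem_idxOf hi, he])

theorem pv_bvec (K : List String) (hK : K.Nodup) :
    ∀ (tokens : List String), (∀ w ∈ tokens, w ∈ K) → ∀ (c : String → Int),
    tokens.foldl
        (fun v w => PySem.List.pySetD v ((List.idxOf w K : Nat) : Int)
          (PySem.List.pyGetD v ((List.idxOf w K : Nat) : Int) 0 + 1))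
        (K.map c)
      = K.map (fun k => c k + (tokens.count k : Int)) := by
  intro tokens
  induction tokens with
  | nil =>
      intro _ c
      simp
  | cons w ws ih =>
      intro hmem c
      have hw : w ∈ K := hmem w (List.mem_cons_self)
      have hi : List.idxOf w K < K.length := List.idxOf_lt_length_of_mem hw
      rw [List.foldl_cons, PySem.List.pySetD_natCast, PySem.List.pyGetD_natCast,
        List.getD_eq_getElem _ _ (by simpa using hi)]
      simp only [List.getElem_map, List.getElem_idxOf]
      rw [pv_set_map K hK c w hw (c w + 1),
        ih (fun x hx => hmem x (List.mem_cons_of_mem _ hx)) (fun k => if k = w then c w + 1 else c k)]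
      apply List.map_congr_left
      intro k hk
      by_cases hkw : k = w
      · subst hkw
        rw [if_pos rfl, List.count_cons_self]
        push_cast
        ring
      · rw [if_neg hkw, List.count_cons]
        simp [Ne.symm hkw]

theorem pv_size_keys {κ ν : Type} (d : PySem.Dict κ ν) : d.size = d.keys.length := by
  simp [PySem.Dict.size, PySem.Dict.keys]

-- ===== VERDICT (by name: the statement is the Claim_ definition above) =====
theorem my_bow_vectorizer_spec : Claim_equal_my_bow_vectorizer := by
  intro texts _
  show my_bow_vectorizer texts = my_bow_vectorizer_alt texts
  unfold my_bow_vectorizer my_bow_vectorizer_alt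
  simp only []
  rw [pv_foldl_flat, pv_foldl_flat, ← PySem.Dict.counter_eq_foldl]
  rw [show PySem.Dict.empty = PySem.Dict.mk ((([] : List String).zipIdx).map (fun p => (p.1, (p.2 : Int)))) from rfl]
  rw [pv_bdict, PySem.Set.update_nil_left]
  rw [PySem.List.foldl_append_singleton_eq_map, List.nil_append]
  rw [pv_size_keys (PySem.Dict.counter _), PySem.Dict.keys_counter]
  have hszB : (PySem.Dict.mk ((PySem.Set.ofList (texts.flatMap PySem.Str.split₀)).zipIdx.map
      (fun p => (p.1, (p.2 : Int))))).size
      = (PySem.Set.ofList (texts.flatMap PySem.Str.split₀)).length := by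
    simp [PySem.Dict.size]
  rw [hszB]
  set K : List String := PySem.Set.ofList (texts.flatMap PySem.Str.split₀) with hK
  have hnd : K.Nodup := PySem.Set.nodup_ofList _
  apply List.map_congr_left
  intro t ht
  have hmem : ∀ w ∈ PySem.Str.split₀ t, w ∈ K := by
    intro w hw
    rw [hK, PySem.Set.mem_ofList, List.mem_flatMap]
    exact ⟨t, ht, hw⟩
  -- A's row for text t
  have hA := pv_enum_fill (fun w => ((PySem.List.count (PySem.Str.split₀ t) w : Nat) : Int))
    K 0 (List.replicate K.length 0) (by simp)
  rw [Nat.cast_zero] at hA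
  rw [hA, List.take_zero, List.nil_append]
  -- B's row for text t
  rw [PySem.List.foldl_congr_mem (PySem.Str.split₀ t) _
    (fun v w => PySem.List.pySetD v ((List.idxOf w K : Nat) : Int)
      (PySem.List.pyGetD v ((List.idxOf w K : Nat) : Int) 0 + 1)) _
    (by
      intro acc w hw
      have hg : (PySem.Dict.mk (K.zipIdx.map (fun p => (p.1, (p.2 : Int))))).getD w 0
          = ((List.idxOf w K : Nat) : Int) := by
        rw [PySem.Dict.getD, pv_idx_get w K (hmem w hw) 0]
        simp
      simp only [hg])]
  rw [show (List.replicate K.length (0 : Int)) = K.map (fun _ => 0) from by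
    rw [List.map_const']]
  rw [pv_bvec K hnd (PySem.Str.split₀ t) hmem (fun _ => 0)]
  apply List.map_congr_left
  intro k _
  rw [PySem.List.count_eq]
  omega
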